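-- pv_equiv track=rewrite | github.com/ishitagupta09/potd-gfg | April-2023/Find Number.py | findNumber
-- ===== SOURCE A (Python) =====
-- def findNumber(N : int) -> int:
--     # code here
--
--     res_list = []
--
--     odd_list = [1,3,5,7,9]
--
--     remainder = 0
--     quotient  = N
--     res = 0
--     tens = 1
--
--     while quotient:
--         remainder = quotient % 5
--         quotient = quotient//5
--         if remainder == 0:
--             res_list.append(odd_list[4])
--             quotient -= 1
--
--         else: res_list.append(odd_list[remainder - 1])
--
--     for i in res_list:
--         res += i * tens
--         tens *= 10
--
--     return res
-- ===== SOURCE B (Python) =====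
-- def findNumber(N: int) -> int:
--     # Recursive bijective base-5 over odd digits: build the decimal number directly,
--     # no digit list and no second assembly loop.
--     if N == 0:
--         return 0
--     remainder = N % 5
--     quotient = N // 5
--     if remainder == 0:
--         digit = 9
--         quotient -= 1
--     else:
--         digit = 2 * remainder - 1
--     return digit + 10 * findNumber(quotient)
-- ===== Notes on version B (the rewrite author's own statement) =====
-- stated objective: simpler
-- what changed: Replaces the two-phase iterative version (collect digits in a list, then a second loop multiplying by growing powers of ten) with a direct recursion on the quotient that builds the decimal number in one expression, with no res_list, no odd_list and no assembly loop.
import Mathlib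
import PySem

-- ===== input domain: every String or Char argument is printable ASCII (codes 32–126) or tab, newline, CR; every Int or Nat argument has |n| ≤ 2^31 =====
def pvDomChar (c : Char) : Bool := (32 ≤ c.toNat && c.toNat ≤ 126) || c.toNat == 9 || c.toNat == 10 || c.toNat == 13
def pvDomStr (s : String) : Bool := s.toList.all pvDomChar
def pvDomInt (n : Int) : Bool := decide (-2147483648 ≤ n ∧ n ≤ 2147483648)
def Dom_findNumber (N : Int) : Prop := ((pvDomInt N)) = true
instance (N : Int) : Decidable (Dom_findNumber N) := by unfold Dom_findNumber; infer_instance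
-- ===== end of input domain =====

-- B replaces A's two-phase loop (digit list + assembly loop) with a direct recursion on the quotient; both Pythons diverge on N < 0, where both ports return 0.
-- ===== PORT A =====
-- while quotient: collect digits into res_list (termination: quotient.toNat decreases; the ≤ 0 guard makes the port total — Python diverges for negative quotient)
def findNumberLoop (quotient : Int) : List Int :=
  if quotient ≤ 0 then []
  else if PySem.Int.mod quotient 5 = 0 then
    (PySem.List.pyGet? [1,3,5,7,9] 4).getD 0 :: findNumberLoop (PySem.Int.floordiv quotient 5 - 1)
  else
    (PySem.List.pyGet? [1,3,5,7,9] (PySem.Int.mod quotient 5 - 1)).getD 0 :: findNumberLoop (PySem.Int.floordiv quotient 5)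
  termination_by quotient.toNat
  decreasing_by
  · have h5 : PySem.Int.floordiv quotient 5 = quotient / 5 :=
      PySem.Int.floordiv_eq_ediv_of_pos (by omega)
    have := Int.ediv_le_self (b := 5) (by omega : (0:Int) ≤ quotient)
    omega
  · have h5 : PySem.Int.floordiv quotient 5 = quotient / 5 :=
      PySem.Int.floordiv_eq_ediv_of_pos (by omega)
    have hm := PySem.Int.floordiv_mul_add_mod quotient 5
    omega

def findNumber (N : Int) : Int :=
  let res_list := findNumberLoop N
  (res_list.foldl (fun (p : Int × Int) i => (p.1 + i * p.2, p.2 * 10)) (0, 1)).1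

-- ===== PORT B =====
-- recursion directly on the quotient (the ≤ 0 guard makes the port total; Python B's base case is N == 0 and it diverges on negatives)
def findNumber_alt (N : Int) : Int :=
  if N ≤ 0 then 0
  else if PySem.Int.mod N 5 = 0 then 9 + 10 * findNumber_alt (PySem.Int.floordiv N 5 - 1)
  else (2 * PySem.Int.mod N 5 - 1) + 10 * findNumber_alt (PySem.Int.floordiv N 5)
  termination_by N.toNat
  decreasing_by
  · have h5 : PySem.Int.floordiv N 5 = N / 5 :=
      PySem.Int.floordiv_eq_ediv_of_pos (by omega)
    have := Int.ediv_le_self (b := 5) (by omega : (0:Int) ≤ N)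
    omega
  · have h5 : PySem.Int.floordiv N 5 = N / 5 :=
      PySem.Int.floordiv_eq_ediv_of_pos (by omega)
    have hm := PySem.Int.floordiv_mul_add_mod N 5
    omega

-- ===== PRECONDITION & SPEC =====
def Spec_findNumber (N : Int) (out : Int) : Prop := out = findNumber_alt N
instance (N : Int) (out : Int) : Decidable (Spec_findNumber N out) := by unfold Spec_findNumber; infer_instance

-- ===== CLAIM (what is proved, stated in full; the proofs are below) =====
def Claim_equal_findNumber : Prop := ∀ (N : Int), Dom_findNumber N → Spec_findNumber N (findNumber N)

-- ===== LEMMAS AND PROOFS =====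
-- A's assembly loop computes a Horner evaluation of the digit list in base 10.
theorem foldl_assemble (l : List Int) (a t : Int) :
    (l.foldl (fun (p : Int × Int) i => (p.1 + i * p.2, p.2 * 10)) (a, t)).1
      = a + t * l.foldr (fun d acc => d + 10 * acc) 0 := by
  induction l generalizing a t with
  | nil => simp
  | cons d l ih => simp [List.foldl, List.foldr, ih]; ring

theorem horner_loop_eq_alt (N : Int) :
    (findNumberLoop N).foldr (fun d acc => d + 10 * acc) 0 = findNumber_alt N := by
  rw [findNumberLoop, findNumber_alt]
  split
  · simp
  · rename_i h
    have hb : 0 ≤ PySem.Int.mod N 5 ∧ PySem.Int.mod N 5 < 5 := by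
      rw [PySem.Int.mod_eq_emod_of_pos (by omega)]
      exact ⟨Int.emod_nonneg _ (by omega), Int.emod_lt_of_pos _ (by omega)⟩
    split
    · rename_i hr
      simp only [List.foldr]
      rw [horner_loop_eq_alt]
      simp [PySem.List.pyGet?, PySem.List.pyIdx?]
    · rename_i hr
      simp only [List.foldr]
      rw [horner_loop_eq_alt]
      have : PySem.Int.mod N 5 = 1 ∨ PySem.Int.mod N 5 = 2 ∨
          PySem.Int.mod N 5 = 3 ∨ PySem.Int.mod N 5 = 4 := by omega
      rcases this with h1 | h1 | h1 | h1 <;> rw [h1] <;>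
        simp [PySem.List.pyGet?, PySem.List.pyIdx?]
  termination_by N.toNat
  decreasing_by
  · have h5 : PySem.Int.floordiv N 5 = N / 5 :=
      PySem.Int.floordiv_eq_ediv_of_pos (by omega)
    have := Int.ediv_le_self (b := 5) (by omega : (0:Int) ≤ N)
    have hm := PySem.Int.floordiv_mul_add_mod N 5
    omega
  · have h5 : PySem.Int.floordiv N 5 = N / 5 :=
      PySem.Int.floordiv_eq_ediv_of_pos (by omega)
    have := Int.ediv_le_self (b := 5) (by omega : (0:Int) ≤ N)
    omega

-- ===== VERDICT (by name: the statement is the Claim_ definition above) =====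
theorem findNumber_spec : Claim_equal_findNumber := by
  intro N _
  unfold Spec_findNumber findNumber
  rw [foldl_assemble, horner_loop_eq_alt]
  ring
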